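-- pv_equiv track=rewrite | github.com/brigante91/SysreptorImporter | NessusBurp2Sysreptoraggrega.py | concat_multiline_unique
-- ===== SOURCE A (Python) =====
-- def concat_multiline_unique(values, separator='\n\n---\n\n'):
--     """
--     Concatena valori multilinea unici, rimuovendo duplicati e spazi inutili.
--     Mantiene l'ordine alfabetico per una lettura coerente.
--     """
--     if not values:
--         return ''
--
--     # Filtra valori vuoti e normalizza spazi
--     cleaned_values = []
--     for val in values:
--         if val and str(val).strip():
--             cleaned = str(val).strip()
--             if cleaned not in cleaned_values:
--                 cleaned_values.append(cleaned)
--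
--     # Ordina alfabeticamente per consistenza
--     cleaned_values.sort()
--
--     return separator.join(cleaned_values) if cleaned_values else ''
-- ===== SOURCE B (Python) =====
-- def concat_multiline_unique(values, separator='\n\n---\n\n'):
--     """Sort-then-adjacent-dedup re-implementation: strip all values, sort,
--     keep each element only when it differs from its predecessor, join."""
--     stripped = sorted(s for s in (str(v).strip() for v in values) if s)
--     result = []
--     for s in stripped:
--         if not result or result[-1] != s:
--             result.append(s)
--     return separator.join(result)
-- ===== Notes on version B (the rewrite author's own statement) =====
-- stated objective: alternative
-- what changed: Deduplication by membership test inside the gathering loop is replaced by sort-then-adjacent-dedup: strip and filter in one pass, sort the multiset, then keep each element only when it differs from its predecessor.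
import Mathlib
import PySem

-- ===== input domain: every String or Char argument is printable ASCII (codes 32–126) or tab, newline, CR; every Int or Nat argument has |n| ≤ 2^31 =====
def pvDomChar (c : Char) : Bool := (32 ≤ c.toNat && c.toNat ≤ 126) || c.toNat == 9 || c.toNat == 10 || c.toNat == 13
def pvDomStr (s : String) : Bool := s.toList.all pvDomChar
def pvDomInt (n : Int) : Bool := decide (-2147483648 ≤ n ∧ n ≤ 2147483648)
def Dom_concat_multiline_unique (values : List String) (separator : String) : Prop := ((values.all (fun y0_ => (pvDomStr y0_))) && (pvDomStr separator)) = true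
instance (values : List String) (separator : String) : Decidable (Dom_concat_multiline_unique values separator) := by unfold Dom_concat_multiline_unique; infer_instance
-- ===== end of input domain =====

-- B replaces A's membership-test dedup inside the gathering loop by sort-then-adjacent-dedup (alternative decomposition, same result).

-- ===== PORT A =====
-- A's gathering loop: strip, keep non-empty, append if not already collected.
def concat_multiline_unique (values : List String) (separator : String) : String :=
  if values = [] then ""
  else
    let cleaned_values := values.foldl
      (fun acc val =>
        if val ≠ "" ∧ PySem.Str.strip val ≠ "" then
          let cleaned := PySem.Str.strip val
          if cleaned ∈ acc then acc else acc ++ [cleaned]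
        else acc) []
    let cleaned_values := PySem.List.sorted cleaned_values (fun x => x) false
    if cleaned_values ≠ [] then PySem.Str.join separator cleaned_values else ""

-- ===== PORT B =====
-- B: strip+filter in one pass, sort, adjacent-dedup loop, join.
def concat_multiline_unique_alt (values : List String) (separator : String) : String :=
  let stripped := PySem.List.sorted ((values.map PySem.Str.strip).filter (fun s => s ≠ "")) (fun x => x) false
  let result := stripped.foldl (fun acc s => if acc.getLast? = some s then acc else acc ++ [s]) []
  PySem.Str.join separator result

-- ===== PRECONDITION & SPEC =====
def Spec_concat_multiline_unique (values : List String) (separator : String) (out : String) : Prop := out = concat_multiline_unique_alt values separator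
instance (values : List String) (separator : String) (out : String) : Decidable (Spec_concat_multiline_unique values separator out) := by unfold Spec_concat_multiline_unique; infer_instance

-- ===== CLAIM (what is proved, stated in full; the proofs are below) =====
def Claim_equal_concat_multiline_unique : Prop := ∀ (values : List String) (separator : String), Dom_concat_multiline_unique values separator → Spec_concat_multiline_unique values separator (concat_multiline_unique values separator)

-- ===== LEMMAS AND PROOFS =====

-- A's gathering loop is ordered dedup (PySem.List.dedup) of the stripped non-empty values.
theorem loopA_eq_dedup (values : List String) (acc : List String) :
    values.foldl
      (fun acc val =>
        if val ≠ "" ∧ PySem.Str.strip val ≠ "" then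
          let cleaned := PySem.Str.strip val
          if cleaned ∈ acc then acc else acc ++ [cleaned]
        else acc) acc
    = ((values.map PySem.Str.strip).filter (fun s => s ≠ "")).foldl PySem.Set.add acc := by
  induction values generalizing acc with
  | nil => rfl
  | cons v vs ih =>
      by_cases hs : PySem.Str.strip v = ""
      · have hv : ¬ (v ≠ "" ∧ PySem.Str.strip v ≠ "") := by
          intro h; exact h.2 hs
        simp [List.foldl_cons, hs, ih]
      · have hv0 : v ≠ "" := by
          intro h; subst h; exact hs rfl
        have hv : (v ≠ "" ∧ PySem.Str.strip v ≠ "") := ⟨hv0, hs⟩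
        have hd : (decide (PySem.Str.strip v ≠ "") = true) := by simpa using hs
        simp only [List.map_cons, List.filter_cons]
        rw [if_pos hd, List.foldl_cons, List.foldl_cons, if_pos hv, ih]
        congr 1
        simp [PySem.Set.add, PySem.Set.contains]

def gB (acc : List String) (s : String) : List String :=
  if acc.head? = some s then acc else s :: acc

-- B's append-at-end dedup loop is the reverse of a cons-based loop.
theorem foldlB_eq_reverse (M : List String) (acc : List String) :
    M.foldl (fun acc s => if acc.getLast? = some s then acc else acc ++ [s]) acc
    = (M.foldl gB acc.reverse).reverse := by
  induction M generalizing acc with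
  | nil => simp
  | cons s M ih =>
      simp only [List.foldl_cons]
      rw [ih]
      congr 1
      simp only [gB, List.head?_reverse]
      by_cases h : acc.getLast? = some s
      · simp [h]
      · simp [h]

-- Invariant for the cons-based dedup loop over a (≤)-sorted list.
theorem gB_spec (M : List String) (racc : List String)
    (hM : M.Pairwise (· ≤ ·)) (hr : racc.Pairwise (fun a b => b < a))
    (hle : ∀ a ∈ racc, ∀ b ∈ M, a ≤ b) :
    (M.foldl gB racc).Pairwise (fun a b => b < a) ∧
    ∀ x, x ∈ M.foldl gB racc ↔ x ∈ racc ∨ x ∈ M := by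
  induction M generalizing racc with
  | nil => exact ⟨hr, by simp⟩
  | cons s M ih =>
      have hM' : M.Pairwise (· ≤ ·) := hM.tail
      have hsM : ∀ b ∈ M, s ≤ b := fun b hb => (List.pairwise_cons.mp hM).1 b hb
      simp only [List.foldl_cons]
      by_cases h : racc.head? = some s
      · have hmem : s ∈ racc := by
          cases racc with
          | nil => simp at h
          | cons a t => simp at h; simp [h]
        have := ih (racc := racc) hM' hr
          (fun a ha b hb => le_trans (hle a ha s (by simp)) (hsM b hb))
        rw [gB, if_pos h]
        refine ⟨this.1, fun x => ?_⟩
        rw [this.2 x]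
        constructor
        · rintro (hx | hx)
          · exact Or.inl hx
          · exact Or.inr (by simp [hx])
        · rintro (hx | hx)
          · exact Or.inl hx
          · rcases List.mem_cons.mp hx with rfl | hx
            · exact Or.inl hmem
            · exact Or.inr hx
      · have hlt : ∀ a ∈ racc, a < s := by
          intro a ha
          cases racc with
          | nil => simp at ha
          | cons h0 t =>
              have hh0 : h0 ≤ s := hle h0 (by simp) s (by simp)
              rcases List.mem_cons.mp ha with rfl | hat
              · exact lt_of_le_of_ne hh0 (by intro he; exact h (by simp [he]))
              · exact lt_of_lt_of_le ((List.pairwise_cons.mp hr).1 a hat) hh0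
        have hr' : (s :: racc).Pairwise (fun a b => b < a) :=
          List.pairwise_cons.mpr ⟨hlt, hr⟩
        have hle' : ∀ a ∈ s :: racc, ∀ b ∈ M, a ≤ b := by
          intro a ha b hb
          rcases List.mem_cons.mp ha with rfl | ha
          · exact hsM b hb
          · exact le_trans (hle a ha s (by simp)) (hsM b hb)
        have := ih (racc := s :: racc) hM' hr' hle'
        rw [gB, if_neg h]
        refine ⟨this.1, fun x => ?_⟩
        rw [this.2 x]
        constructor
        · rintro (hx | hx)
          · rcases List.mem_cons.mp hx with rfl | hx
            · exact Or.inr (by simp)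
            · exact Or.inl hx
          · exact Or.inr (by simp [hx])
        · rintro (hx | hx)
          · exact Or.inl (by simp [hx])
          · rcases List.mem_cons.mp hx with rfl | hx
            · exact Or.inl (by simp)
            · exact Or.inr hx

-- The two dedup strategies produce the same sorted duplicate-free list.
theorem lists_eq (values : List String) :
    PySem.List.sorted
      (values.foldl
        (fun acc val =>
          if val ≠ "" ∧ PySem.Str.strip val ≠ "" then
            let cleaned := PySem.Str.strip val
            if cleaned ∈ acc then acc else acc ++ [cleaned]
          else acc) []) (fun x => x) false
    = (PySem.List.sorted ((values.map PySem.Str.strip).filter (fun s => s ≠ "")) (fun x => x) false).foldl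
        (fun acc s => if acc.getLast? = some s then acc else acc ++ [s]) [] := by
  set L := (values.map PySem.Str.strip).filter (fun s => s ≠ "") with hL
  set M := PySem.List.sorted L (fun x => x) false with hM
  have hMs : M.Pairwise (· ≤ ·) := PySem.List.sorted_pairwise (xs := L) (key := fun x => x)
  have hspec := gB_spec M [] hMs (by simp) (by simp)
  have hrev := foldlB_eq_reverse M []
  simp only [List.reverse_nil] at hrev
  rw [loopA_eq_dedup, ← PySem.Set.ofList_eq_foldl, ← PySem.List.dedup_eq_ofList, hrev]
  set B := (M.foldl gB []).reverse with hB
  have hBp : B.Pairwise (fun a b => a < b) := by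
    rw [hB, List.pairwise_reverse]; exact hspec.1
  have hBmem : ∀ x, x ∈ B ↔ x ∈ L := by
    intro x
    rw [hB, List.mem_reverse, hspec.2 x]
    simp [hM, PySem.List.mem_sorted]
  have hBnd : B.Nodup := hBp.imp ne_of_lt
  have hperm : B.Perm (PySem.List.dedup L) := by
    rw [List.perm_ext_iff_of_nodup hBnd (PySem.List.nodup_dedup L)]
    intro x
    rw [hBmem x, PySem.List.mem_dedup]
  exact PySem.List.sorted_eq_of_perm_of_pairwise_lt _ _ _ hperm hBp

-- ===== VERDICT (by name: the statement is the Claim_ definition above) =====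
theorem concat_multiline_unique_spec : Claim_equal_concat_multiline_unique := by
  intro values separator _
  unfold Spec_concat_multiline_unique concat_multiline_unique concat_multiline_unique_alt
  by_cases hv : values = []
  · subst hv; rfl
  · rw [if_neg hv]
    simp only [lists_eq values]
    set r := (PySem.List.sorted ((values.map PySem.Str.strip).filter (fun s => s ≠ "")) (fun x => x) false).foldl
      (fun acc s => if acc.getLast? = some s then acc else acc ++ [s]) []
    by_cases hr : r = []
    · simp [hr]
      rfl
    · simp [hr]
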